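-- pv_equiv track=rewrite | github.com/ramzialsabarna/Medicare-internal-audit-sysytem | python/validation_code/uvl_to_fm_figure_batch.py | prune_by_depth
-- ===== SOURCE A (Python) =====
-- from collections import deque
--
-- def prune_by_depth(root: str, edges, max_depth: int):
--     children = {}
--     for p, c, rel in edges:
--         children.setdefault(p, []).append((c, rel))
--
--     keep = set()
--     q = deque([(root, 0)])
--     while q:
--         n, d = q.popleft()
--         if n in keep:
--             continue
--         keep.add(n)
--         if d >= max_depth:
--             continue
--         for ch, _ in children.get(n, []):
--             q.append((ch, d+1))
--
--     return [(p, c, rel) for (p, c, rel) in edges if p in keep and c in keep]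
-- ===== SOURCE B (Python) =====
-- def prune_by_depth(root: str, edges, max_depth: int):
--     # Fixed-point iteration of the one-step successor image over the raw edge
--     # list (no adjacency map, no queue): after k rounds keep = nodes within
--     # distance k of root; stop at max_depth rounds or when keep stops growing.
--     keep = {root}
--     depth = 0
--     while depth < max_depth:
--         grown = set(keep)
--         for p, c, _ in edges:
--             if p in keep:
--                 grown.add(c)
--         if len(grown) == len(keep):
--             break
--         keep = grown
--         depth += 1
--     return [(p, c, rel) for (p, c, rel) in edges if p in keep and c in keep]
-- ===== Notes on version B (the rewrite author's own statement) =====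
-- stated objective: alternative
-- what changed: A's adjacency-dict + depth-tagged BFS queue is replaced by a queueless fixed-point iteration: repeatedly (at most max_depth times, stopping when the set stops growing) take the one-step successor image of the kept set by a full scan of the raw edge list; no children map and no queue/frontier exist in B.
import Mathlib
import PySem

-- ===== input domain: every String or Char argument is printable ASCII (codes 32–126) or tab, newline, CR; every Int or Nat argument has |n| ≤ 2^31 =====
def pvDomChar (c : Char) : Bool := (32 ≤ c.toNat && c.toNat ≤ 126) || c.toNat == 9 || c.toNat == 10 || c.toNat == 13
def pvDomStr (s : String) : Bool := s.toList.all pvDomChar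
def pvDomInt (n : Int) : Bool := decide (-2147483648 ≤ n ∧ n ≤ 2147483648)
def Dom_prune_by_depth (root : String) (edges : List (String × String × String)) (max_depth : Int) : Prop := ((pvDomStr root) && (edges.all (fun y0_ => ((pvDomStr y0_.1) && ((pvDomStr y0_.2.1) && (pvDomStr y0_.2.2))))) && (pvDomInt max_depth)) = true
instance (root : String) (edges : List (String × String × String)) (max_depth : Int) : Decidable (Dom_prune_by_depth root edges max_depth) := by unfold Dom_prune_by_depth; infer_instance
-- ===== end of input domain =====

-- B replaces A's adjacency-dict + depth-tagged BFS queue by a queueless fixed-point iteration of the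
-- one-step successor image over the raw edge list (objective: alternative); the final edge filter is shared.

-- ===== PORT A =====
-- children = {}; for p, c, rel in edges: children.setdefault(p, []).append((c, rel))
def pvBuildChildren (edges : List (String × String × String)) : PySem.Dict String (List (String × String)) :=
  edges.foldl (fun d e => d.insert e.1 (d.getD e.1 [] ++ [(e.2.1, e.2.2)])) PySem.Dict.empty

-- the while-loop over the deque; fuel is a termination guard only: edges.length + 2 pops always
-- suffice (proved below via pvMainA/pvPotStep), so the 0-with-nonempty-queue case is never reached
def pvBfsA (ch : PySem.Dict String (List (String × String))) (max_depth : Int) :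
    Nat → PySem.Set String → List (String × Int) → PySem.Set String
  | _, keep, [] => keep
  | 0, keep, _ :: _ => keep
  | fuel + 1, keep, (n, d) :: q =>
    if PySem.Set.contains keep n then pvBfsA ch max_depth fuel keep q
    else
      let keep' := PySem.Set.add keep n
      if max_depth ≤ d then pvBfsA ch max_depth fuel keep' q
      else pvBfsA ch max_depth fuel keep' (q ++ (ch.getD n []).map (fun cr => (cr.1, d + 1)))

def prune_by_depth (root : String) (edges : List (String × String × String)) (max_depth : Int) : List (String × String × String) :=
  let children := pvBuildChildren edges
  let keep := pvBfsA children max_depth (edges.length + 2) PySem.Set.empty [(root, 0)]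
  edges.filter (fun e => PySem.Set.contains keep e.1 && PySem.Set.contains keep e.2.1)

-- ===== PORT B =====
-- one round: grown = set(keep); for p, c, _ in edges: if p in keep: grown.add(c)
def pvGrowB (kp : PySem.Set String) (edges : List (String × String × String)) : PySem.Set String :=
  edges.foldl (fun s e => if PySem.Set.contains kp e.1 then PySem.Set.add s e.2.1 else s)
    (PySem.Set.ofList kp)

-- while depth < max_depth: … ; if len(grown) == len(keep): break; keep = grown; depth += 1
def pvLoopB2 (edges : List (String × String × String)) : Nat → PySem.Set String → PySem.Set String
  | 0, kp => kp
  | k + 1, kp =>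
    let grown := pvGrowB kp edges
    if grown.length = kp.length then kp else pvLoopB2 edges k grown

def prune_by_depth_alt (root : String) (edges : List (String × String × String)) (max_depth : Int) : List (String × String × String) :=
  -- the counter 'depth' runs from 0 up to max_depth: max_depth.toNat remaining iterations
  let keep := pvLoopB2 edges max_depth.toNat (PySem.Set.ofList [root])
  edges.filter (fun e => PySem.Set.contains keep e.1 && PySem.Set.contains keep e.2.1)

-- ===== PRECONDITION & SPEC =====
def Spec_prune_by_depth (root : String) (edges : List (String × String × String)) (max_depth : Int) (out : List (String × String × String)) : Prop := out = prune_by_depth_alt root edges max_depth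
instance (root : String) (edges : List (String × String × String)) (max_depth : Int) (out : List (String × String × String)) : Decidable (Spec_prune_by_depth root edges max_depth out) := by unfold Spec_prune_by_depth; infer_instance

-- ===== CLAIM (what is proved, stated in full; the proofs are below) =====
def Claim_equal_prune_by_depth : Prop := ∀ (root : String) (edges : List (String × String × String)) (max_depth : Int), Dom_prune_by_depth root edges max_depth → Spec_prune_by_depth root edges max_depth (prune_by_depth root edges max_depth)

-- ===== LEMMAS AND PROOFS =====

-- names of the children of n in the adjacency dict
def pvChN (ch : PySem.Dict String (List (String × String))) (n : String) : List String :=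
  (ch.getD n []).map Prod.fst

-- one node of A's level processing: absorb n into keep; when fresh, queue its children's names
def pvStep (ch : PySem.Dict String (List (String × String))) (st : PySem.Set String × List String) (n : String) : PySem.Set String × List String :=
  if PySem.Set.contains st.1 n then st else (PySem.Set.add st.1 n, st.2 ++ pvChN ch n)

-- "add if fresh, and record the fresh ones in order"
def pvScanStep (st : PySem.Set String × List String) (n : String) : PySem.Set String × List String :=
  if PySem.Set.contains st.1 n then st else (PySem.Set.add st.1 n, st.2 ++ [n])

def pvAbsorb (kp : PySem.Set String) (F : List String) : PySem.Set String :=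
  (F.foldl pvScanStep (kp, [])).1

def pvFresh (kp : PySem.Set String) (F : List String) : List String :=
  (F.foldl pvScanStep (kp, [])).2

-- reference level-by-level evaluation: k levels with expansion, then absorb the last frontier
def pvLevA (ch : PySem.Dict String (List (String × String))) :
    Nat → PySem.Set String × List String → PySem.Set String
  | 0, st => pvAbsorb st.1 st.2
  | k + 1, st => pvLevA ch k (st.2.foldl (pvStep ch) (st.1, []))

-- intermediate reference: level-synchronous frontier BFS (the bridge between A's deque and B's image iteration)
def pvExpandB (ch : PySem.Dict String (List (String × String))) (st : PySem.Set String × List String) (n : String) : PySem.Set String × List String :=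
  (ch.getD n []).foldl
    (fun st cr => if PySem.Set.contains st.1 cr.1 then st else (PySem.Set.add st.1 cr.1, st.2 ++ [cr.1])) st

def pvLoopB (ch : PySem.Dict String (List (String × String))) :
    Nat → PySem.Set String × List String → PySem.Set String
  | 0, st => st.1
  | k + 1, st => if st.2.isEmpty then st.1 else pvLoopB ch k (st.2.foldl (pvExpandB ch) (st.1, []))

-- edges whose parent is still unvisited: the termination potential bounding A's queue traffic
def pvPot (edges : List (String × String × String)) (kp : PySem.Set String) : Nat :=
  (edges.filter (fun e => !(PySem.Set.contains kp e.1))).length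

theorem pvFoldl_scan_acc (F : List String) (kp : PySem.Set String) (nq : List String) :
    F.foldl pvScanStep (kp, nq) = ((F.foldl pvScanStep (kp, [])).1, nq ++ (F.foldl pvScanStep (kp, [])).2) := by
  induction F generalizing kp nq with
  | nil => simp
  | cons n F ih =>
    simp only [List.foldl_cons, pvScanStep]
    by_cases h : PySem.Set.contains kp n
    · simp only [h, if_true]; exact ih kp nq
    · simp only [h, Bool.false_eq_true, if_false]
      rw [ih (PySem.Set.add kp n) (nq ++ [n]), ih (PySem.Set.add kp n) ([] ++ [n])]
      simp

theorem pvFoldl_step_acc (ch : PySem.Dict String (List (String × String))) (F : List String) (kp : PySem.Set String) (nq : List String) :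
    F.foldl (pvStep ch) (kp, nq) = ((F.foldl (pvStep ch) (kp, [])).1, nq ++ (F.foldl (pvStep ch) (kp, [])).2) := by
  induction F generalizing kp nq with
  | nil => simp
  | cons n F ih =>
    simp only [List.foldl_cons, pvStep]
    by_cases h : PySem.Set.contains kp n
    · simp only [h, if_true]; exact ih kp nq
    · simp only [h, Bool.false_eq_true, if_false]
      rw [ih (PySem.Set.add kp n) (nq ++ pvChN ch n), ih (PySem.Set.add kp n) ([] ++ pvChN ch n)]
      simp

theorem pvAbsorb_cons (kp : PySem.Set String) (n : String) (F : List String) :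
    pvAbsorb kp (n :: F) = if PySem.Set.contains kp n then pvAbsorb kp F else pvAbsorb (PySem.Set.add kp n) F := by
  simp only [pvAbsorb, List.foldl_cons, pvScanStep]
  by_cases h : PySem.Set.contains kp n
  · have h' : n ∈ kp := (PySem.Set.contains_iff kp n).mp h
    simp [h']
  · have h' : n ∉ kp := fun hm => h ((PySem.Set.contains_iff kp n).mpr hm)
    simp only [h, Bool.false_eq_true, if_false]
    rw [pvFoldl_scan_acc]

theorem pvFresh_cons (kp : PySem.Set String) (n : String) (F : List String) :
    pvFresh kp (n :: F) = if PySem.Set.contains kp n then pvFresh kp F else n :: pvFresh (PySem.Set.add kp n) F := by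
  simp only [pvFresh, List.foldl_cons, pvScanStep]
  by_cases h : PySem.Set.contains kp n
  · have h' : n ∈ kp := (PySem.Set.contains_iff kp n).mp h
    simp [h']
  · have h' : n ∉ kp := fun hm => h ((PySem.Set.contains_iff kp n).mpr hm)
    simp only [h, Bool.false_eq_true, if_false]
    rw [pvFoldl_scan_acc]
    simp [h']

theorem pvLevel_eq (ch : PySem.Dict String (List (String × String))) (F : List String) (kp : PySem.Set String) :
    F.foldl (pvStep ch) (kp, []) = (pvAbsorb kp F, (pvFresh kp F).flatMap (pvChN ch)) := by
  induction F generalizing kp with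
  | nil => simp [pvAbsorb, pvFresh]
  | cons n F ih =>
    simp only [List.foldl_cons, pvStep, pvAbsorb_cons, pvFresh_cons]
    by_cases h : PySem.Set.contains kp n
    · simp only [h, if_true]; exact ih kp
    · simp only [h, Bool.false_eq_true, if_false]
      rw [pvFoldl_step_acc, ih (PySem.Set.add kp n)]
      simp

theorem pvMem_absorb (kp : PySem.Set String) (F : List String) (x : String) :
    x ∈ pvAbsorb kp F ↔ x ∈ kp ∨ x ∈ F := by
  induction F generalizing kp with
  | nil => simp [pvAbsorb]
  | cons n F ih =>
    rw [pvAbsorb_cons]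
    by_cases h : PySem.Set.contains kp n
    · have hn : n ∈ kp := (PySem.Set.contains_iff kp n).mp h
      simp only [h, if_true, ih, List.mem_cons]
      constructor
      · rintro (hx | hx) <;> tauto
      · rintro (hx | rfl | hx) <;> tauto
    · simp only [h, Bool.false_eq_true, if_false, ih, PySem.Set.mem_add, List.mem_cons]
      tauto

theorem pvMem_fresh (kp : PySem.Set String) (F : List String) (x : String) :
    x ∈ pvFresh kp F ↔ x ∈ F ∧ x ∉ kp := by
  induction F generalizing kp with
  | nil => simp [pvFresh]
  | cons n F ih =>
    rw [pvFresh_cons]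
    by_cases h : PySem.Set.contains kp n
    · have hn : n ∈ kp := (PySem.Set.contains_iff kp n).mp h
      rw [if_pos h, ih, List.mem_cons]
      constructor
      · rintro ⟨h1, h2⟩; exact ⟨Or.inr h1, h2⟩
      · rintro ⟨h1 | h1, h2⟩
        · exact absurd (h1 ▸ hn) h2
        · exact ⟨h1, h2⟩
    · have hn : n ∉ kp := fun hm => h ((PySem.Set.contains_iff kp n).mpr hm)
      rw [if_neg h, List.mem_cons, List.mem_cons, ih, PySem.Set.mem_add]
      constructor
      · rintro (rfl | ⟨h1, h2⟩)
        · exact ⟨Or.inl rfl, hn⟩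
        · exact ⟨Or.inr h1, fun hk => h2 (Or.inl hk)⟩
      · rintro ⟨rfl | h1, h2⟩
        · exact Or.inl rfl
        · by_cases hxn : x = n
          · exact Or.inl hxn
          · exact Or.inr ⟨h1, fun hk => hxn ((hk.resolve_left h2))⟩

theorem pvFresh_nodup (kp : PySem.Set String) (F : List String) : (pvFresh kp F).Nodup := by
  induction F generalizing kp with
  | nil => simp [pvFresh]
  | cons n F ih =>
    rw [pvFresh_cons]
    by_cases h : PySem.Set.contains kp n
    · rw [if_pos h]; exact ih kp
    · rw [if_neg h]
      refine List.nodup_cons.mpr ⟨fun hmem => ?_, ih (PySem.Set.add kp n)⟩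
      exact ((pvMem_fresh _ _ _).mp hmem).2 ((PySem.Set.mem_add kp n n).mpr (Or.inr rfl))

theorem pvBiter_eq (ch : PySem.Dict String (List (String × String))) (fr : List String) (kp : PySem.Set String) :
    fr.foldl (pvExpandB ch) (kp, []) = (pvAbsorb kp (fr.flatMap (pvChN ch)), pvFresh kp (fr.flatMap (pvChN ch))) := by
  have h1 : ∀ st : PySem.Set String × List String, ∀ n,
      pvExpandB ch st n = (pvChN ch n).foldl pvScanStep st := by
    intro st n
    rw [pvChN, List.foldl_map]
    rfl
  have h2 : fr.foldl (pvExpandB ch) (kp, []) = (fr.flatMap (pvChN ch)).foldl pvScanStep (kp, []) := by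
    rw [List.foldl_flatMap]
    congr 1
    funext st n
    exact h1 st n
  rw [h2, pvAbsorb, pvFresh]

-- once the frontier is empty, neither loop changes the keep set again
theorem pvLoopB_nil (ch : PySem.Dict String (List (String × String))) (k : Nat) (kp : PySem.Set String) :
    pvLoopB ch k (kp, []) = kp := by
  cases k <;> rfl

theorem pvLevA_nil (ch : PySem.Dict String (List (String × String))) (k : Nat) :
    ∀ kp : PySem.Set String, pvLevA ch k (kp, []) = kp := by
  induction k with
  | zero => intro kp; rfl
  | succ k ih => intro kp; show pvLevA ch k (kp, []) = kp; exact ih kp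

theorem pvSim (ch : PySem.Dict String (List (String × String))) (k : Nat) :
    ∀ (kp : PySem.Set String) (F : List String),
    pvLoopB ch k (pvAbsorb kp F, pvFresh kp F) = pvLevA ch k (kp, F) := by
  induction k with
  | zero => intro kp F; rfl
  | succ k ih =>
    intro kp F
    have hlev : pvLevA ch (k + 1) (kp, F) = pvLevA ch k (pvAbsorb kp F, (pvFresh kp F).flatMap (pvChN ch)) := by
      show pvLevA ch k (F.foldl (pvStep ch) (kp, [])) = _
      rw [pvLevel_eq]
    by_cases hfr : pvFresh kp F = []
    · show (if (pvFresh kp F).isEmpty then pvAbsorb kp F else _) = _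
      rw [hlev, hfr]
      simp only [List.isEmpty_nil, if_true, List.flatMap_nil]
      exact (pvLevA_nil ch k (pvAbsorb kp F)).symm
    · show (if (pvFresh kp F).isEmpty then _ else pvLoopB ch k ((pvFresh kp F).foldl (pvExpandB ch) (pvAbsorb kp F, []))) = _
      rw [if_neg (by simpa [List.isEmpty_iff] using hfr)]
      rw [pvBiter_eq, hlev, ih]

theorem pvLevelA (ch : PySem.Dict String (List (String × String))) (max_depth : Int) (d : Int) (hd : d < max_depth)
    (F : List String) : ∀ (kp : PySem.Set String) (nq : List String) (fuel : Nat),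
    pvBfsA ch max_depth (F.length + fuel) kp (F.map (fun n => (n, d)) ++ nq.map (fun n => (n, d + 1)))
      = pvBfsA ch max_depth fuel (F.foldl (pvStep ch) (kp, nq)).1 ((F.foldl (pvStep ch) (kp, nq)).2.map (fun n => (n, d + 1))) := by
  induction F with
  | nil => intro kp nq fuel; simp
  | cons n F ih =>
    intro kp nq fuel
    have hlen : (n :: F).length + fuel = (F.length + fuel) + 1 := by simp [List.length_cons]; omega
    rw [hlen]
    show pvBfsA ch max_depth ((F.length + fuel) + 1) kp ((n, d) :: (F.map (fun n => (n, d)) ++ nq.map (fun n => (n, d + 1)))) = _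
    by_cases h : PySem.Set.contains kp n
    · rw [pvBfsA]
      simp only [h, if_true]
      rw [ih kp nq fuel]
      simp only [List.foldl_cons, pvStep, h, if_true]
    · rw [pvBfsA]
      simp only [h, Bool.false_eq_true, if_false, if_neg (not_le.mpr hd)]
      have hq : F.map (fun n => (n, d)) ++ nq.map (fun n => (n, d + 1)) ++ (ch.getD n []).map (fun cr => (cr.1, d + 1))
          = F.map (fun n => (n, d)) ++ (nq ++ pvChN ch n).map (fun n => (n, d + 1)) := by
        simp [pvChN, List.map_map, List.map_append, Function.comp]
      rw [hq, ih (PySem.Set.add kp n) (nq ++ pvChN ch n) fuel]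
      simp only [List.foldl_cons, pvStep, h, Bool.false_eq_true, if_false]

theorem pvCutA (ch : PySem.Dict String (List (String × String))) (max_depth : Int) (d : Int) (hd : max_depth ≤ d)
    (F : List String) : ∀ (kp : PySem.Set String) (fuel : Nat),
    pvBfsA ch max_depth (F.length + fuel) kp (F.map (fun n => (n, d))) = pvAbsorb kp F := by
  induction F with
  | nil => intro kp fuel; cases fuel <;> rfl
  | cons n F ih =>
    intro kp fuel
    have hlen : (n :: F).length + fuel = (F.length + fuel) + 1 := by simp [List.length_cons]; omega
    rw [hlen]
    show pvBfsA ch max_depth ((F.length + fuel) + 1) kp ((n, d) :: F.map (fun n => (n, d))) = _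
    by_cases h : PySem.Set.contains kp n
    · rw [pvBfsA]
      simp only [h, if_true]
      rw [ih kp fuel, pvAbsorb_cons, if_pos h]
    · rw [pvBfsA]
      simp only [h, Bool.false_eq_true, if_false, if_pos hd]
      rw [ih (PySem.Set.add kp n) fuel, pvAbsorb_cons, if_neg h]

theorem pvBucket_gen (es : List (String × String × String)) (p : String) :
    ∀ d : PySem.Dict String (List (String × String)),
    (es.foldl (fun d e => d.insert e.1 (d.getD e.1 [] ++ [(e.2.1, e.2.2)])) d).getD p []
      = d.getD p [] ++ (es.filter (fun e => e.1 == p)).map (fun e => (e.2.1, e.2.2)) := by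
  induction es with
  | nil => intro d; simp
  | cons e es ih =>
    intro d
    rw [List.foldl_cons, ih]
    by_cases h : e.1 = p
    · subst h
      rw [PySem.Dict.getD_insert_self]
      simp
    · rw [PySem.Dict.getD_insert]
      have hbe : (e.1 == p) = false := beq_eq_false_iff_ne.mpr h
      rw [if_neg (fun hc => h hc.symm)]
      simp [hbe]

theorem pvBucket (edges : List (String × String × String)) (p : String) :
    (pvBuildChildren edges).getD p [] = (edges.filter (fun e => e.1 == p)).map (fun e => (e.2.1, e.2.2)) := by
  rw [pvBuildChildren, pvBucket_gen]
  simp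

theorem pvMem_chN (edges : List (String × String × String)) (n x : String) :
    x ∈ pvChN (pvBuildChildren edges) n ↔ ∃ e ∈ edges, e.1 = n ∧ e.2.1 = x := by
  simp only [pvChN, pvBucket, List.map_map, List.mem_map, List.mem_filter, Function.comp, beq_iff_eq]
  constructor
  · rintro ⟨e, ⟨he, h1⟩, h2⟩; exact ⟨e, he, h1, h2⟩
  · rintro ⟨e, he, h1, h2⟩; exact ⟨e, ⟨he, h1⟩, h2⟩

theorem pvLen_filter_partition {α : Type} (l : List α) (p q : α → Bool)
    (h : ∀ x ∈ l, ¬(p x = true ∧ q x = true)) :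
    (l.filter p).length + (l.filter q).length = (l.filter (fun x => p x || q x)).length := by
  induction l with
  | nil => simp
  | cons a l ih =>
    have ha := h a (List.mem_cons_self ..)
    have ih' := ih (fun x hx => h x (List.mem_cons_of_mem _ hx))
    by_cases hp : p a <;> by_cases hq : q a
    · exact absurd ⟨hp, hq⟩ ha
    all_goals
      simp only [List.filter_cons, hp, hq, if_true, if_false, Bool.false_eq_true,
        Bool.or_false, Bool.false_or, Bool.or_self, List.length_cons]
      omega

theorem pvLen_filter_le_of_imp {α : Type} (l : List α) (p q r : α → Bool)
    (hpr : ∀ x ∈ l, p x = true → r x = true) (hqr : ∀ x ∈ l, q x = true → r x = true)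
    (hpq : ∀ x ∈ l, ¬(p x = true ∧ q x = true)) :
    (l.filter p).length + (l.filter q).length ≤ (l.filter r).length := by
  induction l with
  | nil => simp
  | cons a l ih =>
    have ih' := ih (fun x hx => hpr x (List.mem_cons_of_mem _ hx))
      (fun x hx => hqr x (List.mem_cons_of_mem _ hx)) (fun x hx => hpq x (List.mem_cons_of_mem _ hx))
    have h1 := hpr a (List.mem_cons_self ..)
    have h2 := hqr a (List.mem_cons_self ..)
    have h3 := hpq a (List.mem_cons_self ..)
    by_cases hp : p a <;> by_cases hq : q a <;> by_cases hr : r a <;>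
      simp [hp, hq, hr] at * <;> omega

theorem pvSumCount (edges : List (String × String × String)) (fr : List String) (hf : fr.Nodup) :
    (fr.map (fun n => ((edges.filter (fun e => e.1 == n)).length))).sum
      = (edges.filter (fun e => decide (e.1 ∈ fr))).length := by
  induction fr with
  | nil => simp
  | cons n fr ih =>
    have hnd := List.nodup_cons.mp hf
    rw [List.map_cons, List.sum_cons, ih hnd.2]
    have hdisj : ∀ x ∈ edges, ¬(((fun e => e.1 == n) x) = true ∧ ((fun e => decide (e.1 ∈ fr)) x) = true) := by
      intro x _ ⟨h1, h2⟩
      have hx1 : x.1 = n := beq_iff_eq.mp h1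
      exact hnd.1 (hx1 ▸ of_decide_eq_true h2)
    rw [pvLen_filter_partition edges _ _ hdisj]
    congr 1
    apply List.filter_congr
    intro x _
    by_cases h1 : x.1 = n <;> by_cases h2 : x.1 ∈ fr <;> simp [h1, h2]

theorem pvPotStep (edges : List (String × String × String)) (kp : PySem.Set String) (F : List String) :
    ((pvFresh kp F).flatMap (pvChN (pvBuildChildren edges))).length + pvPot edges (pvAbsorb kp F)
      ≤ pvPot edges kp := by
  have hlen : ((pvFresh kp F).flatMap (pvChN (pvBuildChildren edges))).length
      = (edges.filter (fun e => decide (e.1 ∈ pvFresh kp F))).length := by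
    rw [List.length_flatMap]
    rw [← pvSumCount edges _ (pvFresh_nodup kp F)]
    congr 1
    apply List.map_congr_left
    intro n _
    simp [pvChN, pvBucket]
  have hpot : pvPot edges (pvAbsorb kp F)
      = (edges.filter (fun e => !(PySem.Set.contains kp e.1) && !(decide (e.1 ∈ F)))).length := by
    unfold pvPot
    congr 1
    apply List.filter_congr
    intro x _
    by_cases h1 : x.1 ∈ kp <;> by_cases h2 : x.1 ∈ F <;>
      simp [h1, h2, pvMem_absorb]
  rw [hlen, hpot]
  apply pvLen_filter_le_of_imp
  · intro x _ hx
    have hm := of_decide_eq_true hx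
    have := ((pvMem_fresh kp F x.1).mp hm).2
    simp only [Bool.not_eq_true']
    rw [← Bool.not_eq_true]
    exact fun hc => this ((PySem.Set.contains_iff _ _).mp hc)
  · intro x _ hx
    exact (Bool.and_eq_true _ _).mp hx |>.1
  · intro x _ ⟨h1, h2⟩
    have hm := of_decide_eq_true h1
    have hF := ((pvMem_fresh kp F x.1).mp hm).1
    have := (Bool.and_eq_true _ _).mp h2 |>.2
    simp [hF] at this

theorem pvMainA (edges : List (String × String × String)) (max_depth : Int) (k : Nat) :
    ∀ (kp : PySem.Set String) (F : List String) (d : Int) (fuel : Nat),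
      (k = 0 ∧ max_depth ≤ d) ∨ (d + k = max_depth ∧ 1 ≤ k) →
      F.length + pvPot edges kp ≤ fuel →
      pvBfsA (pvBuildChildren edges) max_depth fuel kp (F.map (fun n => (n, d)))
        = pvLevA (pvBuildChildren edges) k (kp, F) := by
  induction k with
  | zero =>
    intro kp F d fuel hH hfuel
    have hd : max_depth ≤ d := by rcases hH with ⟨_, h⟩ | ⟨_, h⟩; exact h; omega
    obtain ⟨m, rfl⟩ : ∃ m, fuel = F.length + m := ⟨fuel - F.length, by omega⟩
    rw [pvCutA _ _ _ hd]
    rfl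
  | succ k ih =>
    intro kp F d fuel hH hfuel
    have hdk : d + (k + 1 : Nat) = max_depth := by
      rcases hH with ⟨h, _⟩ | ⟨h, _⟩; · omega
      · exact h
    have hd : d < max_depth := by omega
    obtain ⟨m, rfl⟩ : ∃ m, fuel = F.length + m := ⟨fuel - F.length, by omega⟩
    have hstep := pvLevelA (pvBuildChildren edges) max_depth d hd F kp [] m
    rw [List.map_nil, List.append_nil] at hstep
    rw [hstep, pvLevel_eq]
    have hnext := ih (pvAbsorb kp F) ((pvFresh kp F).flatMap (pvChN (pvBuildChildren edges))) (d + 1) m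
      (by rcases Nat.eq_zero_or_pos k with hk | hk
          · left; constructor; exact hk; omega
          · right; constructor; omega; omega)
      (by have := pvPotStep edges kp F
          have hm : pvPot edges kp ≤ m := by omega
          omega)
    rw [hnext]
    show _ = pvLevA (pvBuildChildren edges) k (F.foldl (pvStep (pvBuildChildren edges)) (kp, []))
    rw [pvLevel_eq]

theorem pvKeep_eq (root : String) (edges : List (String × String × String)) (max_depth : Int) :
    pvBfsA (pvBuildChildren edges) max_depth (edges.length + 2) PySem.Set.empty [(root, 0)]
      = pvLoopB (pvBuildChildren edges) max_depth.toNat (PySem.Set.ofList [root], [root]) := by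
  have hq : [((root : String), (0 : Int))] = [root].map (fun n => (n, (0 : Int))) := by simp
  have hH : ((max_depth.toNat = 0 ∧ max_depth ≤ (0:Int)) ∨ ((0:Int) + max_depth.toNat = max_depth ∧ 1 ≤ max_depth.toNat)) := by omega
  have hfuel : ([root] : List String).length + pvPot edges PySem.Set.empty ≤ edges.length + 2 := by
    have := List.length_filter_le (fun e : String × String × String => !(PySem.Set.contains PySem.Set.empty e.1)) edges
    simp only [pvPot, List.length_cons, List.length_nil]
    omega
  rw [hq, pvMainA edges max_depth max_depth.toNat PySem.Set.empty [root] 0 (edges.length + 2) hH hfuel]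
  have hst : ((PySem.Set.ofList [root] : PySem.Set String), ([root] : List String))
      = (pvAbsorb PySem.Set.empty [root], pvFresh PySem.Set.empty [root]) := by
    simp [pvAbsorb, pvFresh, pvScanStep, PySem.Set.add, PySem.Set.contains, PySem.Set.ofList, PySem.Set.empty]
  rw [hst, pvSim]

-- ===== B-side: the image-iteration loop has the same members as the frontier loop =====

theorem pvGrow_mem_aux (kp : PySem.Set String) (es : List (String × String × String)) :
    ∀ (s : PySem.Set String) (x : String),
    x ∈ es.foldl (fun s e => if PySem.Set.contains kp e.1 then PySem.Set.add s e.2.1 else s) s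
      ↔ x ∈ s ∨ ∃ e ∈ es, e.1 ∈ kp ∧ e.2.1 = x := by
  induction es with
  | nil => intro s x; simp
  | cons e es ih =>
    intro s x
    rw [List.foldl_cons]
    by_cases h : PySem.Set.contains kp e.1
    · have hm : e.1 ∈ kp := (PySem.Set.contains_iff kp e.1).mp h
      rw [if_pos h, ih, PySem.Set.mem_add]
      constructor
      · rintro ((hx | rfl) | ⟨f, hf, h1, h2⟩)
        · exact Or.inl hx
        · exact Or.inr ⟨e, List.mem_cons_self .., hm, rfl⟩
        · exact Or.inr ⟨f, List.mem_cons_of_mem _ hf, h1, h2⟩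
      · rintro (hx | ⟨f, hf, h1, h2⟩)
        · exact Or.inl (Or.inl hx)
        · rcases List.mem_cons.mp hf with rfl | hf'
          · exact Or.inl (Or.inr h2.symm)
          · exact Or.inr ⟨f, hf', h1, h2⟩
    · have hm : e.1 ∉ kp := fun hk => h ((PySem.Set.contains_iff kp e.1).mpr hk)
      rw [if_neg h, ih]
      constructor
      · rintro (hx | ⟨f, hf, h1, h2⟩)
        · exact Or.inl hx
        · exact Or.inr ⟨f, List.mem_cons_of_mem _ hf, h1, h2⟩
      · rintro (hx | ⟨f, hf, h1, h2⟩)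
        · exact Or.inl hx
        · rcases List.mem_cons.mp hf with rfl | hf'
          · exact absurd h1 hm
          · exact Or.inr ⟨f, hf', h1, h2⟩

theorem pvMem_grow (kp : PySem.Set String) (edges : List (String × String × String)) (x : String) :
    x ∈ pvGrowB kp edges ↔ x ∈ kp ∨ ∃ e ∈ edges, e.1 ∈ kp ∧ e.2.1 = x := by
  rw [pvGrowB, pvGrow_mem_aux]
  simp [PySem.Set.mem_ofList]

theorem pvGrow_nodup_aux (kp : PySem.Set String) (es : List (String × String × String)) :
    ∀ s : PySem.Set String, s.Nodup →
    (es.foldl (fun s e => if PySem.Set.contains kp e.1 then PySem.Set.add s e.2.1 else s) s).Nodup := by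
  induction es with
  | nil => intro s hs; simpa
  | cons e es ih =>
    intro s hs
    rw [List.foldl_cons]
    by_cases h : PySem.Set.contains kp e.1
    · rw [if_pos h]; exact ih _ (PySem.Set.nodup_add _ _ hs)
    · rw [if_neg h]; exact ih _ hs

theorem pvGrow_nodup (kp : PySem.Set String) (edges : List (String × String × String)) :
    (pvGrowB kp edges).Nodup :=
  pvGrow_nodup_aux kp edges _ (PySem.Set.nodup_ofList kp)

theorem pvGrow_extend (kp : PySem.Set String) (es : List (String × String × String)) :
    ∀ s : PySem.Set String,
    s.length ≤ (es.foldl (fun s e => if PySem.Set.contains kp e.1 then PySem.Set.add s e.2.1 else s) s).length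
    ∧ ((es.foldl (fun s e => if PySem.Set.contains kp e.1 then PySem.Set.add s e.2.1 else s) s).length = s.length
        → es.foldl (fun s e => if PySem.Set.contains kp e.1 then PySem.Set.add s e.2.1 else s) s = s) := by
  induction es with
  | nil => intro s; exact ⟨le_refl _, fun _ => rfl⟩
  | cons e es ih =>
    intro s
    rw [List.foldl_cons]
    by_cases h : PySem.Set.contains kp e.1
    · rw [if_pos h]
      by_cases hm : e.2.1 ∈ s
      · rw [PySem.Set.add_of_mem hm]; exact ih s
      · rw [PySem.Set.add_of_not_mem hm]
        have hlen : (s ++ [e.2.1]).length = s.length + 1 := by simp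
        rcases ih (s ++ [e.2.1]) with ⟨h1, _⟩
        constructor
        · omega
        · intro hc; omega
    · rw [if_neg h]; exact ih s

theorem pvGrow_fix_aux (kp : PySem.Set String) (es : List (String × String × String))
    (hcl : ∀ e ∈ es, e.1 ∈ kp → e.2.1 ∈ kp) :
    ∀ s : PySem.Set String, (∀ x ∈ kp, x ∈ s) →
    es.foldl (fun s e => if PySem.Set.contains kp e.1 then PySem.Set.add s e.2.1 else s) s = s := by
  induction es with
  | nil => intro s _; rfl
  | cons e es ih =>
    intro s hsub
    rw [List.foldl_cons]
    by_cases h : PySem.Set.contains kp e.1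
    · have hm : e.1 ∈ kp := (PySem.Set.contains_iff kp e.1).mp h
      have hc : e.2.1 ∈ s := hsub _ (hcl e (List.mem_cons_self ..) hm)
      rw [if_pos h, PySem.Set.add_of_mem hc]
      exact ih (fun f hf => hcl f (List.mem_cons_of_mem _ hf)) s hsub
    · rw [if_neg h]
      exact ih (fun f hf => hcl f (List.mem_cons_of_mem _ hf)) s hsub

theorem pvGrow_fix (kp : PySem.Set String) (edges : List (String × String × String))
    (hnd : kp.Nodup) (hcl : ∀ e ∈ edges, e.1 ∈ kp → e.2.1 ∈ kp) :
    pvGrowB kp edges = kp := by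
  rw [pvGrowB, PySem.Set.ofList_eq_self_of_nodup kp hnd]
  exact pvGrow_fix_aux kp edges hcl kp (fun x hx => hx)

-- the simulation invariant: the frontier is inside keep, and every child of a kept
-- node is kept or a child of a frontier node
def pvInv (ch : PySem.Dict String (List (String × String))) (kp : PySem.Set String) (fr : List String) : Prop :=
  (∀ n ∈ fr, n ∈ kp) ∧
  (∀ x n, n ∈ kp → x ∈ pvChN ch n → x ∈ kp ∨ ∃ m ∈ fr, x ∈ pvChN ch m)

theorem pvSim2 (edges : List (String × String × String)) (k : Nat) :
    ∀ (kp : PySem.Set String) (fr : List String) (kp' : PySem.Set String),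
      kp'.Nodup →
      pvInv (pvBuildChildren edges) kp fr →
      (∀ x, x ∈ kp' ↔ x ∈ kp) →
      ∀ x, (x ∈ pvLoopB (pvBuildChildren edges) k (kp, fr) ↔ x ∈ pvLoopB2 edges k kp') := by
  induction k with
  | zero =>
    intro kp fr kp' _ _ heq x
    exact (heq x).symm
  | succ k ih =>
    intro kp fr kp' hnd hinv heq x
    rcases hinv with ⟨hfr_sub, hchild⟩
    -- members of one image step agree: kp' ∪ Ch(kp') has the same members as kp ∪ Ch(fr)
    have hL : ∀ y, (∃ m ∈ fr, y ∈ pvChN (pvBuildChildren edges) m) ↔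
        y ∈ (fr.flatMap (pvChN (pvBuildChildren edges))) := by
      intro y; simp [List.mem_flatMap]
    have hgrow_mem : ∀ y, y ∈ pvGrowB kp' edges ↔
        y ∈ kp ∨ ∃ m ∈ fr, y ∈ pvChN (pvBuildChildren edges) m := by
      intro y
      rw [pvMem_grow]
      constructor
      · rintro (hy | ⟨e, he, h1, h2⟩)
        · exact Or.inl ((heq y).mp hy)
        · have hy : y ∈ pvChN (pvBuildChildren edges) e.1 :=
            (pvMem_chN edges e.1 y).mpr ⟨e, he, rfl, h2⟩
          rcases hchild y e.1 ((heq e.1).mp h1) hy with hk | hm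
          · exact Or.inl hk
          · exact Or.inr hm
      · rintro (hy | ⟨m, hm, hy⟩)
        · exact Or.inl ((heq y).mpr hy)
        · rcases (pvMem_chN edges m y).mp hy with ⟨e, he, h1, h2⟩
          exact Or.inr ⟨e, he, (heq e.1).mpr (h1 ▸ hfr_sub m hm), h2⟩
    show x ∈ (if fr.isEmpty then kp else
        pvLoopB (pvBuildChildren edges) k (fr.foldl (pvExpandB (pvBuildChildren edges)) (kp, []))) ↔
      x ∈ (if (pvGrowB kp' edges).length = kp'.length then kp' else pvLoopB2 edges k (pvGrowB kp' edges))
    by_cases hfe : fr.isEmpty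
    · -- empty frontier: both sides are at a fixed point
      have hfix : pvGrowB kp' edges = kp' := by
        apply pvGrow_fix kp' edges hnd
        intro e he h1
        have hy : e.2.1 ∈ pvChN (pvBuildChildren edges) e.1 :=
          (pvMem_chN edges e.1 e.2.1).mpr ⟨e, he, rfl, rfl⟩
        rcases hchild e.2.1 e.1 ((heq e.1).mp h1) hy with hk | ⟨m, hm, _⟩
        · exact (heq e.2.1).mpr hk
        · exact absurd hm (by simp [List.isEmpty_iff] at hfe; simp [hfe])
      rw [if_pos hfe, if_pos (by rw [hfix])]
      exact (heq x).symm
    · rw [if_neg hfe, pvBiter_eq]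
      set L := fr.flatMap (pvChN (pvBuildChildren edges)) with hLdef
      -- membership of the next keep sets
      have hnext_eq : ∀ y, y ∈ pvGrowB kp' edges ↔ y ∈ pvAbsorb kp L := by
        intro y
        rw [hgrow_mem, pvMem_absorb, hL]
      by_cases hlen : (pvGrowB kp' edges).length = kp'.length
      · -- B hits the fixed point: grown = kp'; A's next frontier must be empty
        have hof : PySem.Set.ofList kp' = kp' := PySem.Set.ofList_eq_self_of_nodup kp' hnd
        have hfix : pvGrowB kp' edges = kp' := by
          simp only [pvGrowB, hof] at hlen ⊢
          exact (pvGrow_extend kp' edges kp').2 hlen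
        rw [if_pos hlen]
        have hLsub : ∀ y ∈ L, y ∈ kp := by
          intro y hy
          have : y ∈ pvGrowB kp' edges := (hgrow_mem y).mpr (Or.inr ((hL y).mpr hy))
          rw [hfix] at this
          exact (heq y).mp this
        have hfrnil : pvFresh kp L = [] := by
          apply List.eq_nil_iff_forall_not_mem.mpr
          intro z hz
          rcases (pvMem_fresh kp L z).mp hz with ⟨h1, h2⟩
          exact h2 (hLsub z h1)
        rw [hfrnil, pvLoopB_nil]
        rw [pvMem_absorb]
        constructor
        · rintro (hx | hx)
          · exact (heq x).mpr hx
          · exact (heq x).mpr (hLsub x hx)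
        · intro hx; exact Or.inl ((heq x).mp hx)
      · -- both loops advance one round
        rw [if_neg hlen]
        apply ih (pvAbsorb kp L) (pvFresh kp L) (pvGrowB kp' edges)
          (pvGrow_nodup kp' edges)
        · constructor
          · intro n hn
            rw [pvMem_absorb]
            exact Or.inr ((pvMem_fresh kp L n).mp hn).1
          · intro y n hn hy
            rw [pvMem_absorb] at hn
            by_cases hnk : n ∈ kp
            · rcases hchild y n hnk hy with hk | hm
              · left; rw [pvMem_absorb]; exact Or.inl hk
              · left; rw [pvMem_absorb]; exact Or.inr ((hL y).mp hm)
            · have hnL : n ∈ L := hn.resolve_left hnk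
              right
              exact ⟨n, (pvMem_fresh kp L n).mpr ⟨hnL, hnk⟩, hy⟩
        · intro y; exact hnext_eq y

-- the two programs keep the same set of nodes
theorem pvKeep_members (root : String) (edges : List (String × String × String)) (max_depth : Int) (x : String) :
    x ∈ pvBfsA (pvBuildChildren edges) max_depth (edges.length + 2) PySem.Set.empty [(root, 0)] ↔
    x ∈ pvLoopB2 edges max_depth.toNat (PySem.Set.ofList [root]) := by
  rw [pvKeep_eq]
  apply pvSim2 edges max_depth.toNat (PySem.Set.ofList [root]) [root] (PySem.Set.ofList [root])
    (PySem.Set.nodup_ofList _)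
  · constructor
    · intro n hn
      rw [PySem.Set.mem_ofList]; exact hn
    · intro y n hn hy
      rw [PySem.Set.mem_ofList] at hn
      rcases List.mem_singleton.mp hn with rfl
      exact Or.inr ⟨n, List.mem_singleton_self _, hy⟩
  · intro y; exact Iff.rfl

-- ===== VERDICT (by name: the statement is the Claim_ definition above) =====
theorem prune_by_depth_spec : Claim_equal_prune_by_depth := by
  intro root edges max_depth _
  unfold Spec_prune_by_depth prune_by_depth prune_by_depth_alt
  apply List.filter_congr
  intro e _
  have h1 := pvKeep_members root edges max_depth e.1
  have h2 := pvKeep_members root edges max_depth e.2.1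
  congr 1 <;>
  · rw [Bool.eq_iff_iff, PySem.Set.contains_iff, PySem.Set.contains_iff]
    first | exact h1 | exact h2
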